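-- pv_equiv track=rewrite | github.com/k1rszen/my-farm-advisor | data/workspace/scripts/collect_nc_soil_crop_data_incremental.py | _rotation_outlook
-- ===== SOURCE A (Python) =====
-- from collections import Counter
--
-- def _rotation_outlook(names: list[str]) -> dict:
--     if not names:
--         return {"predicted_next_crop": "Unknown", "rotation_confidence": "none"}
--     current = names[-1]
--     followers = [names[i+1] for i, c in enumerate(names[:-1]) if c == current]
--     if followers:
--         counter = Counter(followers)
--         best_count = max(counter.values())
--         best = sorted(n for n, cnt in counter.items() if cnt == best_count)[0]
--         conf = "high" if best_count >= 2 else "medium"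
--     else:
--         best = names[-2] if len(names) >= 2 else current
--         conf = "low"
--     return {"predicted_next_crop": best, "rotation_confidence": conf}
-- ===== SOURCE B (Python) =====
-- from collections import Counter, defaultdict
--
-- def _rotation_outlook(names: list[str]) -> dict:
--     if not names:
--         return {"predicted_next_crop": "Unknown", "rotation_confidence": "none"}
--     # Build the full Markov transition table in one pass over adjacent pairs.
--     markov: defaultdict = defaultdict(Counter)
--     for prev, nxt in zip(names, names[1:]):
--         markov[prev][nxt] += 1
--     current = names[-1]
--     followers = markov.get(current)
--     if followers:
--         best_count = max(followers.values())
--         best = min(n for n, c in followers.items() if c == best_count)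
--         conf = "high" if best_count >= 2 else "medium"
--     else:
--         best = names[-2] if len(names) >= 2 else current
--         conf = "low"
--     return {"predicted_next_crop": best, "rotation_confidence": conf}
-- ===== Notes on version B (the rewrite author's own statement) =====
-- stated objective: idiomatic
-- what changed: Instead of scanning the history for occurrences of the last crop and indexing names[i+1], B builds a full Markov transition table (dict of Counters over all adjacent pairs via zip) and looks the last crop up in it, taking the most frequent follower with min() instead of sorted()[0].
import Mathlib
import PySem

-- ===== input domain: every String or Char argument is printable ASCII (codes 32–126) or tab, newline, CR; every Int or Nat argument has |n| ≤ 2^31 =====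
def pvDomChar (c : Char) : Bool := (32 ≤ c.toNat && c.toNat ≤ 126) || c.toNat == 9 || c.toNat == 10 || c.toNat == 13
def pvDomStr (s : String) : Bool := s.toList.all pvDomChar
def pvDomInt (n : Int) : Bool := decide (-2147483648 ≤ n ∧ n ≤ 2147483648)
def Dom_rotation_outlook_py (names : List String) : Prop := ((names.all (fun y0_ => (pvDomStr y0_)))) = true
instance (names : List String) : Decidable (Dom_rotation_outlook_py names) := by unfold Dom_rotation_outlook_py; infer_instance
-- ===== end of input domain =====

-- B replaces A's scan for followers of the last crop (with index arithmetic names[i+1])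
-- by a one-pass Markov transition table over adjacent pairs, looked up at the last crop;
-- objective: more idiomatic. Same return value everywhere.

-- ===== PORT A =====
def rotation_outlook_py (names : List String) : List (String × String) :=
  if names = [] then [("predicted_next_crop", "Unknown"), ("rotation_confidence", "none")]
  else
    let current := PySem.List.pyGetD names (-1) ""
    let followers := (PySem.List.enumerate (PySem.List.slice names none (some (-1))) 0).foldl
      (fun acc p => if p.2 = current then acc ++ [PySem.List.pyGetD names (p.1 + 1) ""] else acc) []
    if followers ≠ [] then
      let counter := PySem.Dict.counter followers
      let best_count := (PySem.List.max? counter.values (fun v => v)).getD 0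
      let best := PySem.List.pyGetD
        (PySem.List.sorted ((counter.items.filter (fun p => p.2 = best_count)).map (fun p => p.1)) (fun n => n) false) 0 ""
      let conf := if (2 : Int) ≤ best_count then "high" else "medium"
      [("predicted_next_crop", best), ("rotation_confidence", conf)]
    else
      let best := if 2 ≤ names.length then PySem.List.pyGetD names (-2) "" else current
      [("predicted_next_crop", best), ("rotation_confidence", "low")]

-- ===== PORT B =====
def rotation_outlook_py_alt (names : List String) : List (String × String) :=
  if names = [] then [("predicted_next_crop", "Unknown"), ("rotation_confidence", "none")]
  else
    let markov := (names.zip names.tail).foldl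
      (fun m p => m.modify p.1 PySem.Dict.empty (fun c => c.modify p.2 0 (· + 1)))
      (PySem.Dict.empty : PySem.Dict String (PySem.Dict String Int))
    let current := PySem.List.pyGetD names (-1) ""
    let lowBest := if 2 ≤ names.length then PySem.List.pyGetD names (-2) "" else current
    match markov.get? current with
    | some followers =>
      if followers.size ≠ 0 then
        let best_count := (PySem.List.max? followers.values (fun v => v)).getD 0
        let best := (PySem.List.min?
          ((followers.items.filter (fun p => p.2 = best_count)).map (fun p => p.1)) (fun n => n)).getD current
        let conf := if (2 : Int) ≤ best_count then "high" else "medium"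
        [("predicted_next_crop", best), ("rotation_confidence", conf)]
      else
        [("predicted_next_crop", lowBest), ("rotation_confidence", "low")]
    | none => [("predicted_next_crop", lowBest), ("rotation_confidence", "low")]

-- ===== PRECONDITION & SPEC =====
def Spec_rotation_outlook_py (names : List String) (out : List (String × String)) : Prop := out = rotation_outlook_py_alt names
instance (names : List String) (out : List (String × String)) : Decidable (Spec_rotation_outlook_py names out) := by unfold Spec_rotation_outlook_py; infer_instance

-- ===== CLAIM (what is proved, stated in full; the proofs are below) =====
def Claim_equal_rotation_outlook_py : Prop := ∀ (names : List String), Dom_rotation_outlook_py names → Spec_rotation_outlook_py names (rotation_outlook_py names)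

-- ===== LEMMAS AND PROOFS =====

-- the adjacent-pairs list, elementwise
theorem enum_dropLast_pairs (names : List String) :
    (PySem.List.enumerate names.dropLast 0).map
      (fun p => (p.2, PySem.List.pyGetD names (p.1 + 1) "")) = names.zip names.tail := by
  apply List.ext_getElem
  · simp [PySem.List.length_enumerate, List.length_zip]
  · intro k h1 h2
    have hk : k < names.dropLast.length := by
      simpa [PySem.List.length_enumerate] using h1
    have hkn : k + 1 < names.length := by
      simp [List.length_dropLast] at hk; omega
    have hk' : k < (PySem.List.enumerate names.dropLast 0).length := by
      simpa [PySem.List.length_enumerate] using hk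
    simp only [List.getElem_map, PySem.List.getElem_enumerate names.dropLast 0 k hk',
      List.getElem_zip]
    have hcast : (0 : Int) + (k : Int) + 1 = ((k + 1 : Nat) : Int) := by push_cast; ring
    rw [hcast, PySem.List.pyGetD_natCast]
    simp [List.getElem_dropLast, List.getElem_tail, List.getD_eq_getElem?_getD,
      List.getElem?_eq_getElem hkn]

-- A's follower scan equals filter/map over the adjacent pairs
theorem followersA_eq (names : List String) (current : String) :
    (PySem.List.enumerate (PySem.List.slice names none (some (-1))) 0).foldl
      (fun acc p => if p.2 = current then acc ++ [PySem.List.pyGetD names (p.1 + 1) ""] else acc) [] =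
    ((names.zip names.tail).filter (fun p => p.1 = current)).map (fun p => p.2) := by
  rw [PySem.List.slice_to_neg_one]
  have hfun : (fun (acc : List String) (p : Int × String) =>
        if p.2 = current then acc ++ [PySem.List.pyGetD names (p.1 + 1) ""] else acc)
      = (fun acc p => if (fun (q : Int × String) => decide (q.2 = current)) p = true
          then acc ++ [(fun (q : Int × String) => PySem.List.pyGetD names (q.1 + 1) "") p] else acc) := by
    funext acc p
    simp
  rw [hfun, PySem.List.foldl_append_if, List.nil_append]
  rw [← enum_dropLast_pairs names]
  simp [List.filter_map, List.map_map, Function.comp_def]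

-- accumulator invariant for the Markov fold
theorem markov_getD (ps : List (String × String)) (m : PySem.Dict String (PySem.Dict String Int)) (k : String) :
    (ps.foldl (fun m p => m.modify p.1 PySem.Dict.empty (fun c => c.modify p.2 0 (· + 1))) m).getD k PySem.Dict.empty
    = ((ps.filter (fun p => p.1 = k)).map (fun p => p.2)).foldl
        (fun c x => c.modify x 0 (· + 1)) (m.getD k PySem.Dict.empty) := by
  induction ps generalizing m with
  | nil => rfl
  | cons p ps ih =>
    simp only [List.foldl_cons, List.filter_cons]
    rw [ih]
    by_cases h : p.1 = k
    · simp [h]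
    · simp [h, PySem.Dict.getD_modify, Ne.symm h]

theorem markov_getD_counter (ps : List (String × String)) (k : String) :
    (ps.foldl (fun m p => m.modify p.1 PySem.Dict.empty (fun c => c.modify p.2 0 (· + 1)))
        PySem.Dict.empty).getD k PySem.Dict.empty
    = PySem.Dict.counter ((ps.filter (fun p => p.1 = k)).map (fun p => p.2)) := by
  rw [markov_getD, PySem.Dict.getD_empty, PySem.Dict.counter_eq_foldl]

theorem markov_keys (ps : List (String × String)) :
    (ps.foldl (fun m p => m.modify p.1 PySem.Dict.empty (fun c => c.modify p.2 0 (· + 1)))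
        (PySem.Dict.empty : PySem.Dict String (PySem.Dict String Int))).keys
      = PySem.Set.ofList (ps.map (fun p => p.1)) := by
  have h := PySem.Dict.keys_foldl_modify_key ps (fun p => p.1)
      (PySem.Dict.empty : PySem.Dict String Int)
      (fun (_ : PySem.Dict String (PySem.Dict String Int)) (p : String × String)
        (c : PySem.Dict String Int) => c.modify p.2 0 (· + 1)) PySem.Dict.empty
  rw [h]
  rfl

-- sorted(l)[0] = min(l) for nonempty l of strings
theorem sorted_head_eq_min (l : List String) (hl : l ≠ []) (d d' : String) :
    PySem.List.pyGetD (PySem.List.sorted l (fun n => n) false) 0 d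
      = (PySem.List.min? l (fun n => n)).getD d' := by
  cases hm : PySem.List.min? l (fun n => n) with
  | none =>
    exact absurd ((PySem.List.min?_eq_none_iff _ _).mp hm) hl
  | some m =>
    cases hs : PySem.List.sorted l (fun n => n) false with
    | nil =>
      have hlen := (PySem.List.sorted_perm l (fun n => n) false).length_eq
      rw [hs] at hlen
      cases l <;> simp_all
    | cons a s =>
      rw [PySem.List.pyGetD_zero_cons]
      simp only [Option.getD_some]
      have hmem_a : a ∈ l := by
        have ha : a ∈ PySem.List.sorted l (fun n => n) false := by
          rw [hs]; exact List.mem_cons_self ..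
        exact (PySem.List.mem_sorted l _ false a).mp ha
      have hml : m ∈ l := PySem.List.min?_mem hm
      apply le_antisymm
      · have hpw := PySem.List.sorted_pairwise l (fun n => n)
        rw [hs] at hpw
        have hms : m ∈ PySem.List.sorted l (fun n => n) false :=
          (PySem.List.mem_sorted l _ false m).mpr hml
        rw [hs] at hms
        rcases List.mem_cons.mp hms with h | h
        · exact le_of_eq h.symm
        · exact (List.pairwise_cons.mp hpw).1 m h
      · exact PySem.List.min?_isMin hm a hmem_a

-- ===== VERDICT (by name: the statement is the Claim_ definition above) =====
-- the Markov table of B, looked up at `current`, is `some (Counter followers)` when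
-- `current` occurs as a first component, and `none` otherwise
theorem markov_get? (names : List String) (current : String) :
    ((names.zip names.tail).foldl
        (fun m p => m.modify p.1 PySem.Dict.empty (fun c => c.modify p.2 0 (· + 1)))
        (PySem.Dict.empty : PySem.Dict String (PySem.Dict String Int))).get? current
      = if ((names.zip names.tail).filter (fun p => p.1 = current)) = [] then none
        else some (PySem.Dict.counter
          (((names.zip names.tail).filter (fun p => p.1 = current)).map (fun p => p.2))) := by
  have hkeys := markov_keys (names.zip names.tail)
  by_cases hfil : ((names.zip names.tail).filter (fun p => p.1 = current)) = []
  · rw [if_pos hfil]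
    rw [PySem.Dict.get?_eq_none_iff_not_mem_keys]
    rw [hkeys]
    intro hmem
    rw [PySem.Set.mem_ofList] at hmem
    rcases List.mem_map.mp hmem with ⟨p, hp, hp1⟩
    have : p ∈ ((names.zip names.tail).filter (fun p => p.1 = current)) :=
      List.mem_filter.mpr ⟨hp, by simp [hp1]⟩
    simp [hfil] at this
  · rw [if_neg hfil]
    have hmem : current ∈ ((names.zip names.tail).foldl
        (fun m p => m.modify p.1 PySem.Dict.empty (fun c => c.modify p.2 0 (· + 1)))
        (PySem.Dict.empty : PySem.Dict String (PySem.Dict String Int))).keys := by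
      rw [hkeys, PySem.Set.mem_ofList]
      rcases List.exists_mem_of_ne_nil _ hfil with ⟨p, hp⟩
      have hp' := List.mem_filter.mp hp
      exact List.mem_map.mpr ⟨p, hp'.1, by simpa using hp'.2⟩
    cases hg : ((names.zip names.tail).foldl
        (fun m p => m.modify p.1 PySem.Dict.empty (fun c => c.modify p.2 0 (· + 1)))
        (PySem.Dict.empty : PySem.Dict String (PySem.Dict String Int))).get? current with
    | none =>
      exact absurd ((PySem.Dict.get?_eq_none_iff_not_mem_keys _ _).mp hg) (not_not.mpr hmem)
    | some v =>
      have hv : v = PySem.Dict.counter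
          (((names.zip names.tail).filter (fun p => p.1 = current)).map (fun p => p.2)) := by
        have := markov_getD_counter (names.zip names.tail) current
        rw [PySem.Dict.getD, hg] at this
        simpa using this
      rw [hv]

-- a Counter of a nonempty list is a nonempty dict
theorem counter_size_ne_zero (l : List String) (hl : l ≠ []) :
    (PySem.Dict.counter l).size ≠ 0 := by
  rcases List.exists_mem_of_ne_nil _ hl with ⟨x, hx⟩
  have hx' : x ∈ PySem.Set.ofList l := (PySem.Set.mem_ofList l x).mpr hx
  have : (x, (l.count x : Int)) ∈ (PySem.Dict.counter l).items := by
    rw [PySem.Dict.items_counter]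
    exact List.mem_map.mpr ⟨x, hx', rfl⟩
  unfold PySem.Dict.size
  intro h0
  rw [List.length_eq_zero_iff] at h0
  simp [h0] at this

-- the best-count filter over a nonempty Counter's items is nonempty
theorem bestFilter_ne_nil (l : List String) (hl : l ≠ []) :
    ((PySem.Dict.counter l).items.filter
        (fun p => p.2 = (PySem.List.max? (PySem.Dict.counter l).values (fun v => v)).getD 0)).map
      (fun p => p.1) ≠ [] := by
  have hvals : (PySem.Dict.counter l).values ≠ [] := by
    intro h
    have : (PySem.Dict.counter l).items = [] := by
      have := congrArg List.length h
      simpa [PySem.Dict.values, List.length_eq_zero_iff] using this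
    exact counter_size_ne_zero l hl (by simp [PySem.Dict.size, this])
  cases hmx : PySem.List.max? (PySem.Dict.counter l).values (fun v => v) with
  | none => exact absurd ((PySem.List.max?_eq_none_iff _ _).mp hmx) hvals
  | some bc =>
    have hbc : bc ∈ (PySem.Dict.counter l).values := PySem.List.max?_mem hmx
    rcases List.mem_map.mp hbc with ⟨p, hp, hp2⟩
    intro h
    rw [List.map_eq_nil_iff] at h
    have hpf : p ∈ (PySem.Dict.counter l).items.filter
        (fun p => p.2 = (some bc).getD 0) :=
      List.mem_filter.mpr ⟨hp, by simp [hp2]⟩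
    rw [h] at hpf
    simp at hpf

-- ===== VERDICT (by name: the statement is the Claim_ definition above) =====
theorem rotation_outlook_py_spec : Claim_equal_rotation_outlook_py := by
  intro names _
  show rotation_outlook_py names = rotation_outlook_py_alt names
  by_cases hn : names = []
  · subst hn; rfl
  · simp only [rotation_outlook_py, rotation_outlook_py_alt, if_neg hn]
    rw [followersA_eq names (PySem.List.pyGetD names (-1) ""), markov_get? names (PySem.List.pyGetD names (-1) "")]
    by_cases hfil : ((names.zip names.tail).filter (fun p => p.1 = PySem.List.pyGetD names (-1) "")) = []
    · rw [if_pos hfil, hfil]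
      simp
    · rw [if_neg hfil]
      have hL : ((names.zip names.tail).filter
          (fun p => p.1 = PySem.List.pyGetD names (-1) "")).map (fun p => p.2) ≠ [] := by
        simpa [List.map_eq_nil_iff] using hfil
      rw [if_pos hL]
      dsimp only
      rw [if_pos (counter_size_ne_zero _ hL)]
      rw [sorted_head_eq_min _ (bestFilter_ne_nil _ hL) "" (PySem.List.pyGetD names (-1) "")]
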